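-- pv_equiv track=rewrite | github.com/Vleshchik/python_winter_work_2023 | Tasks/Task_6/Task6_3.py | uni_let
-- ===== SOURCE A (Python) =====
-- lst_n = '''1234567890'''
--
-- lst_l = '''qwertyuiopasdfghjklzxcvbnm'''
--
-- def uni_let(lst):
--     set_l = set()
--     set_n = set()
--     set_s = set()
--     for i in lst:
--         if i in lst_n:
--             set_n = set_n.union(i)
--         elif i in lst_l:
--             set_l = set_l.union(i)
--         else:
--             set_s = set_s.union(i)
--     str_s = sorted(set_s)
--     str_l = sorted(set_l)
--     str_n = sorted(set_n)
--     str_s = ' '.join(str_s)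
--     str_l = ' '.join(str_l)
--     str_n = ' '.join(str_n)
--     return f'{str_l}\n {str_n}\n {str_s}'
-- ===== SOURCE B (Python) =====
-- lst_n = '''1234567890'''
--
-- lst_l = '''qwertyuiopasdfghjklzxcvbnm'''
--
-- def uni_let(lst):
--     s = sorted(set(lst))
--     str_l = ' '.join(c for c in s if c in lst_l)
--     str_n = ' '.join(c for c in s if c in lst_n)
--     str_s = ' '.join(c for c in s if c not in lst_n and c not in lst_l)
--     return f'{str_l}\n {str_n}\n {str_s}'
-- ===== Notes on version B (the rewrite author's own statement) =====
-- stated objective: faster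
-- what changed: Replaces the three-way dispatching loop over the raw string (which rebuilds a fresh set via set.union per character, then sorts each bucket) by one dedup+sort of the whole input followed by three independent filter passes that are already sorted.
import Mathlib
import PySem

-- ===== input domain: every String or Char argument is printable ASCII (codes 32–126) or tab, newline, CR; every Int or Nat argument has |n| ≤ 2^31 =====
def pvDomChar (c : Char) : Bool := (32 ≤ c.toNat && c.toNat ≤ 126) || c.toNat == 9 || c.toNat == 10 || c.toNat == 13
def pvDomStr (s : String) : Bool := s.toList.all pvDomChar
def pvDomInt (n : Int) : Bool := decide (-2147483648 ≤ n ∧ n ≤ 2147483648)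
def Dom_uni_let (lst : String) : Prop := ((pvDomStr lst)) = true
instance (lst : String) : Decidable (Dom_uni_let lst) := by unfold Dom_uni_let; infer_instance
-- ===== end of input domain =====

-- B replaces A's dispatching loop (three sets rebuilt via set.union per char, sorted separately) by one
-- sorted dedup of the whole input followed by three filter passes (objective: faster; measured).

-- module-level constants of the Python file
def pvLstN : List Char := ['1','2','3','4','5','6','7','8','9','0']
def pvLstL : List Char := ['q','w','e','r','t','y','u','i','o','p','a','s','d','f','g','h','j','k','l','z','x','c','v','b','n','m']

-- ===== PORT A =====
def uni_let (lst : String) : String :=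
  let r := lst.toList.foldl
    (fun (acc : PySem.Set Char × PySem.Set Char × PySem.Set Char) (i : Char) =>
      if i ∈ pvLstN then (acc.1, PySem.Set.add acc.2.1 i, acc.2.2)
      else if i ∈ pvLstL then (PySem.Set.add acc.1 i, acc.2.1, acc.2.2)
      else (acc.1, acc.2.1, PySem.Set.add acc.2.2 i))
    (PySem.Set.empty, PySem.Set.empty, PySem.Set.empty)
  let strS := PySem.Chars.join [' '] ((PySem.List.sorted r.2.2 (fun x => x) false).map ([·]))
  let strL := PySem.Chars.join [' '] ((PySem.List.sorted r.1 (fun x => x) false).map ([·]))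
  let strN := PySem.Chars.join [' '] ((PySem.List.sorted r.2.1 (fun x => x) false).map ([·]))
  String.ofList (strL ++ '\n' :: ' ' :: strN ++ '\n' :: ' ' :: strS)

-- ===== PORT B =====
def uni_let_alt (lst : String) : String :=
  let s := PySem.List.sorted (PySem.Set.ofList lst.toList) (fun x => x) false
  let strL := PySem.Chars.join [' '] ((s.filter (fun c => decide (c ∈ pvLstL))).map ([·]))
  let strN := PySem.Chars.join [' '] ((s.filter (fun c => decide (c ∈ pvLstN))).map ([·]))
  let strS := PySem.Chars.join [' '] ((s.filter (fun c => decide (c ∉ pvLstN ∧ c ∉ pvLstL))).map ([·]))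
  String.ofList (strL ++ '\n' :: ' ' :: strN ++ '\n' :: ' ' :: strS)

-- ===== PRECONDITION & SPEC =====
def Spec_uni_let (lst : String) (out : String) : Prop := out = uni_let_alt lst
instance (lst : String) (out : String) : Decidable (Spec_uni_let lst out) := by unfold Spec_uni_let; infer_instance

-- ===== CLAIM (what is proved, stated in full; the proofs are below) =====
def Claim_equal_uni_let : Prop := ∀ (lst : String), Dom_uni_let lst → Spec_uni_let lst (uni_let lst)

-- ===== LEMMAS AND PROOFS =====

-- A's fold splits into three independent filtered set-builds
theorem pv_fold_split (cs : List Char) (l n s : PySem.Set Char) :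
    cs.foldl
      (fun (acc : PySem.Set Char × PySem.Set Char × PySem.Set Char) (i : Char) =>
        if i ∈ pvLstN then (acc.1, PySem.Set.add acc.2.1 i, acc.2.2)
        else if i ∈ pvLstL then (PySem.Set.add acc.1 i, acc.2.1, acc.2.2)
        else (acc.1, acc.2.1, PySem.Set.add acc.2.2 i)) (l, n, s)
    = ((cs.filter (fun c => decide (c ∉ pvLstN ∧ c ∈ pvLstL))).foldl PySem.Set.add l,
       (cs.filter (fun c => decide (c ∈ pvLstN))).foldl PySem.Set.add n,
       (cs.filter (fun c => decide (c ∉ pvLstN ∧ c ∉ pvLstL))).foldl PySem.Set.add s) := by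
  induction cs generalizing l n s with
  | nil => rfl
  | cons c cs ih =>
    by_cases hn : c ∈ pvLstN <;> by_cases hl : c ∈ pvLstL <;>
      simp [List.foldl_cons, hn, hl, ih]

-- dedup commutes with filter (first-occurrence dedup)
theorem pv_ofList_filter (p : Char → Bool) (cs : List Char) (acc : PySem.Set Char) :
    (cs.filter p).foldl PySem.Set.add (acc.filter p) = ((cs.foldl PySem.Set.add acc).filter p) := by
  induction cs generalizing acc with
  | nil => rfl
  | cons c cs ih =>
    by_cases hp : p c
    · have : PySem.Set.add (acc.filter p) c = (PySem.Set.add acc c).filter p := by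
        by_cases hm : c ∈ acc
        · rw [PySem.Set.add_of_mem hm, PySem.Set.add_of_mem (by simpa [List.mem_filter, hp] using hm)]
        · rw [PySem.Set.add_of_not_mem hm,
            PySem.Set.add_of_not_mem (fun h => hm (List.mem_filter.mp h).1)]
          simp [List.filter_append, hp]
      simp [hp, List.foldl_cons, this, ih]
    · have : (PySem.Set.add acc c).filter p = acc.filter p := by
        by_cases hm : c ∈ acc
        · rw [PySem.Set.add_of_mem hm]
        · rw [PySem.Set.add_of_not_mem hm]; simp [List.filter_append, hp]
      simp [hp, List.foldl_cons, ← this, ih]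

-- sorting a filtered dedup = filtering the sorted dedup
theorem pv_sorted_filter (p : Char → Bool) (cs : List Char) :
    PySem.List.sorted ((PySem.Set.ofList cs).filter p) (fun x => x) false
    = (PySem.List.sorted (PySem.Set.ofList cs) (fun x => x) false).filter p := by
  apply PySem.List.sorted_eq_of_perm_of_pairwise_lt
  · exact ((PySem.List.sorted_perm _ _ _).filter p)
  · exact (PySem.List.sorted_ofList_pairwise_lt cs).filter p

-- ===== VERDICT (by name: the statement is the Claim_ definition above) =====
set_option maxRecDepth 8192 in
theorem uni_let_spec : Claim_equal_uni_let := by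
  intro lst _
  show uni_let lst = uni_let_alt lst
  have key : ∀ p : Char → Bool,
      (lst.toList.filter p).foldl PySem.Set.add PySem.Set.empty
        = (PySem.Set.ofList lst.toList).filter p := by
    intro p
    have := pv_ofList_filter p lst.toList PySem.Set.empty
    simpa [PySem.Set.empty, PySem.Set.ofList_eq_foldl] using this
  have hdisj : ∀ c ∈ pvLstL, c ∉ pvLstN := by
    intro c hc
    fin_cases hc <;> decide
  have hfun : (fun c => decide (c ∉ pvLstN ∧ c ∈ pvLstL)) = (fun c => decide (c ∈ pvLstL)) := by
    funext c
    by_cases h : c ∈ pvLstL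
    · simp [h, hdisj c h]
    · simp [h]
  unfold uni_let uni_let_alt
  rw [pv_fold_split]
  simp only [key, pv_sorted_filter, hfun]
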